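-- pv_equiv track=rewrite | github.com/Jwells2244/IUH200 | Wells-midterm.py | xmatrix
-- ===== SOURCE A (Python) =====
-- def cleaned_text(string):
--     """this function takes a string and returns a copy of the string with all the commas, periods, exclamation points
--     and question marks removed.
--     String -> String"""
--     cleanedString = ""
--     for i in range(len(string)):
--         if string[i] in "?,!.":
--             pass
--         else:
--             cleanedString += string[i].lower()
--     return cleanedString
--
-- def str_to_words(string):
--     """This function takes a string, and returns a list with every word as an element in the list, using the
--     cleaned_text function
--     String -> List of strings"""
--     returnList = string.split()
--     for i in range(len(returnList)):
--         returnList[i] = cleaned_text(returnList[i])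
--     return returnList
--
-- def str_to_unique_words(string):
--     """This function works similarily to str_to_words, except for the list it returns of each word in the string does
--     not contain any duplicate strings, instead of just returning every word in the string in a list
--     string -> List of strings"""
--     firstList = string.split()
--     returnList = []
--     for val in firstList:
--         if cleaned_text(val) not in returnList:
--             returnList.append(cleaned_text(val))
--     return returnList
--
-- def transitions(string, first, second):
--     """This function takes 3 strings, the intial string, then the two transition values first and second. This function
--     returns the count of how many times first and second are in a row in string.
--     String, string, string -> Int"""
--     count = 0
--     stringList = str_to_words(string)
--     if len(stringList) != 0:
--         for i in range(len(stringList)):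
--             try:
--                 if stringList[i] == first and stringList[i+1] == second:
--                     count += 1
--             except IndexError:
--                 return count
--     return count
--
-- def xmatrix(string):
--     """This function takes the test string and returns a transition matrix(list of lists of ints) for all transitions in the
--     given string
--     string -> Transition matrix(list of lists of ints)"""
--     string = cleaned_text(string)
--     wordList = str_to_words(string)
--     uniqueList = str_to_unique_words(string)
--     matrix = []
--     for word in uniqueList:
--         addList = []
--         for val in uniqueList:
--             addList.append(transitions(string, word, val))
--         matrix.append(addList)
--     return matrix
-- ===== SOURCE B (Python) =====
-- def xmatrix(string):
--     """Transition-count matrix over unique words: one pass counts adjacent word pairs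
--     into a dict, then the matrix is filled by lookup (instead of re-scanning the text
--     for every pair of unique words)."""
--     cleaned = "".join(ch.lower() for ch in string if ch not in "?,!.")
--     words = cleaned.split()
--     uniq = list(dict.fromkeys(words))
--     pairs = {}
--     for a, b in zip(words, words[1:]):
--         pairs[(a, b)] = pairs.get((a, b), 0) + 1
--     return [[pairs.get((a, b), 0) for b in uniq] for a in uniq]
-- ===== Notes on version B (the rewrite author's own statement) =====
-- stated objective: faster
-- what changed: Instead of re-scanning the whole text once per pair of unique words (transitions called U*U times, each an O(N) pass with repeated cleaning/splitting), B cleans and splits once, counts adjacent word pairs in a single pass into a dict, and fills the matrix by dict lookup.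
import Mathlib
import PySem

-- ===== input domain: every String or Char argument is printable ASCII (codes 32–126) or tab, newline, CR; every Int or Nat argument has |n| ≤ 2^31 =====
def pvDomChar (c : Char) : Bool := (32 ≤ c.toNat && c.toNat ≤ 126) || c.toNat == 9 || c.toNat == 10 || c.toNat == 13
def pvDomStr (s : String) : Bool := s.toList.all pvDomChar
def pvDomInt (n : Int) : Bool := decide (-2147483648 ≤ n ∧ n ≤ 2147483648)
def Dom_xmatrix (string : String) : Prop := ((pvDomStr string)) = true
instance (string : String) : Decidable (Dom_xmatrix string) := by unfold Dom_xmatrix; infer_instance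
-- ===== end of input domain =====

-- B replaces A's per-pair re-scans of the text (transitions called once per pair of unique
-- words) by a single pass counting adjacent word pairs into a dict, then fills the matrix
-- by lookup (faster).

-- ===== PORT A =====

-- the punctuation characters of the Python literal "?,!."
def pvPunct : List Char := ['?', ',', '!', '.']

-- cleaned_text: loop over the characters, skip punctuation, append the lowered char
def cleaned_textA (string : String) : String :=
  String.ofList
    (string.toList.foldl
      (fun acc c => if pvPunct.contains c then acc else acc ++ [PySem.Chars.lowerChar c]) [])

-- str_to_words: split, then replace each element by its cleaned_text
def str_to_wordsA (string : String) : List String :=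
  (PySem.Str.split₀ string).map cleaned_textA

-- str_to_unique_words: append cleaned_text(val) when not already present
def str_to_unique_wordsA (string : String) : List String :=
  (PySem.Str.split₀ string).foldl
    (fun acc w => if acc.contains (cleaned_textA w) then acc else acc ++ [cleaned_textA w]) []

-- the 'for i in range(len)' loop of transitions; pyGet? none = IndexError → return count
def transGoA (ws : List String) (first second : String) : List Int → Int → Int
  | [], count => count
  | i :: rest, count =>
    match PySem.List.pyGet? ws i with
    | none => count
    | some wi =>
      if wi = first then
        match PySem.List.pyGet? ws (i + 1) with
        | none => count
        | some wj => transGoA ws first second rest (if wj = second then count + 1 else count)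
      else transGoA ws first second rest count

def transitionsA (string first second : String) : Int :=
  let stringList := str_to_wordsA string
  if stringList.length ≠ 0 then
    transGoA stringList first second (PySem.List.pyRange 0 stringList.length 1) 0
  else 0

def xmatrix (string : String) : List (List Int) :=
  let string1 := cleaned_textA string
  let _wordList := str_to_wordsA string1
  let uniqueList := str_to_unique_wordsA string1
  uniqueList.map (fun word => uniqueList.map (fun val => transitionsA string1 word val))

-- ===== PORT B =====

-- ''.join(ch.lower() for ch in string if ch not in "?,!.")
def cleanCharsB (cs : List Char) : List Char :=
  (cs.filter (fun c => !pvPunct.contains c)).map PySem.Chars.lowerChar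

def xmatrix_alt (string : String) : List (List Int) :=
  let cleaned := String.ofList (cleanCharsB string.toList)
  let words := PySem.Str.split₀ cleaned
  let uniq := PySem.List.dedup words
  let pairs := (words.zip words.tail).foldl
    (fun d p => d.insert p (d.getD p 0 + 1)) PySem.Dict.empty
  uniq.map (fun a => uniq.map (fun b => pairs.getD (a, b) 0))

-- ===== PRECONDITION & SPEC =====
def Spec_xmatrix (string : String) (out : List (List Int)) : Prop := out = xmatrix_alt string
instance (string : String) (out : List (List Int)) : Decidable (Spec_xmatrix string out) := by unfold Spec_xmatrix; infer_instance

-- ===== CLAIM (what is proved, stated in full; the proofs are below) =====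
def Claim_equal_xmatrix : Prop := ∀ (string : String), Dom_xmatrix string → Spec_xmatrix string (xmatrix string)

-- ===== LEMMAS AND PROOFS =====

theorem char_eq_of_toNat (c d : Char) (h : c.toNat = d.toNat) : c = d := by
  apply Char.ext; apply UInt32.toNat.inj h
theorem char_le_iff_toNat (c d : Char) : c ≤ d ↔ c.toNat ≤ d.toNat :=
  Iff.intro (fun h => Fin.mk_le_mk.mp h) (fun h => Fin.mk_le_mk.mpr h)
def CleanFixed (c : Char) : Prop := PySem.Chars.lowerChar c = c ∧ c ∉ pvPunct

theorem mem_pvPunct_iff (c : Char) :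
    c ∈ pvPunct ↔ (c.toNat = 63 ∨ c.toNat = 44 ∨ c.toNat = 33 ∨ c.toNat = 46) := by
  constructor
  · intro h; fin_cases h <;> simp [Char.toNat]
  · rintro (h|h|h|h) <;>
      [ (have : c = '?' := char_eq_of_toNat _ _ (by simpa using h));
        (have : c = ',' := char_eq_of_toNat _ _ (by simpa using h));
        (have : c = '!' := char_eq_of_toNat _ _ (by simpa using h));
        (have : c = '.' := char_eq_of_toNat _ _ (by simpa using h))] <;>
      subst this <;> simp [pvPunct]

theorem lower_toNat (c : Char) (h65 : 65 ≤ c.toNat) (h90 : c.toNat ≤ 90) :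
    (Char.ofNat (c.toNat + 32)).toNat = c.toNat + 32 := by
  rw [Char.toNat_ofNat]
  have hv : (c.toNat + 32).isValidChar := by left; omega
  simp [hv]

theorem lowerChar_cleanFixed (c : Char) (h : c ∉ pvPunct) :
    CleanFixed (PySem.Chars.lowerChar c) := by
  have hA : ('A').toNat = 65 := by decide
  have hZ : ('Z').toNat = 90 := by decide
  by_cases hu : 'A' ≤ c ∧ c ≤ 'Z'
  · have h65 : 65 ≤ c.toNat := by have := (char_le_iff_toNat 'A' c).mp hu.1; omega
    have h90 : c.toNat ≤ 90 := by have := (char_le_iff_toNat c 'Z').mp hu.2; omega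
    have ht := lower_toNat c h65 h90
    have hlc : PySem.Chars.lowerChar c = Char.ofNat (c.toNat + 32) := by
      simp only [PySem.Chars.lowerChar, PySem.Chars.isupper]
      rw [if_pos (by simp [hu.1, hu.2])]
    rw [hlc]
    constructor
    · simp only [PySem.Chars.lowerChar, PySem.Chars.isupper]
      rw [if_neg]
      intro hcon
      rw [Bool.and_eq_true, decide_eq_true_iff, decide_eq_true_iff] at hcon
      have := (char_le_iff_toNat _ 'Z').mp hcon.2
      omega
    · rw [mem_pvPunct_iff]; omega
  · have hb : ¬((decide ('A' ≤ c) && decide (c ≤ 'Z')) = true) := by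
      rcases not_and_or.mp hu with h' | h' <;> simp [h']
    have hlc : PySem.Chars.lowerChar c = c := by
      simp only [PySem.Chars.lowerChar, PySem.Chars.isupper]
      rw [if_neg hb]
    rw [hlc]; exact ⟨hlc, h⟩

theorem mem_cleanCharsB_cleanFixed {cs : List Char} {c : Char} (hc : c ∈ cleanCharsB cs) :
    CleanFixed c := by
  unfold cleanCharsB at hc
  rcases List.mem_map.mp hc with ⟨c', hc', rfl⟩
  rcases List.mem_filter.mp hc' with ⟨_, hp⟩
  apply lowerChar_cleanFixed
  simpa using hp

theorem split₀_go_prop (P : Char → Prop) :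
    ∀ (s cur : List Char) (acc : List (List Char)),
      (∀ c ∈ s, P c) → (∀ c ∈ cur, P c) → (∀ w ∈ acc, ∀ c ∈ w, P c) →
      ∀ w ∈ PySem.Chars.split₀.go s cur acc, ∀ c ∈ w, P c := by
  intro s
  induction s with
  | nil =>
    intro cur acc hs hcur hacc w hw
    rw [PySem.Chars.split₀.go] at hw
    split at hw
    · intro c hcw; exact hacc w (by simpa using hw) c hcw
    · rw [List.mem_reverse, List.mem_cons] at hw
      rcases hw with rfl | hw
      · intro c hcw; exact hcur c (by simpa using hcw)
      · intro c hcw; exact hacc w hw c hcw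
  | cons d rest ih =>
    intro cur acc hs hcur hacc w hw
    rw [PySem.Chars.split₀.go] at hw
    have hrest : ∀ c ∈ rest, P c := fun c hc => hs c (List.mem_cons_of_mem _ hc)
    split at hw
    · split at hw
      · exact ih [] acc hrest (by simp) hacc w hw
      · refine ih [] (cur.reverse :: acc) hrest (by simp) ?_ w hw
        intro w' hw' c hc
        rcases List.mem_cons.mp hw' with rfl | hw'
        · exact hcur c (by simpa using hc)
        · exact hacc w' hw' c hc
    · refine ih (d :: cur) acc hrest ?_ hacc w hw
      intro c hc
      rcases List.mem_cons.mp hc with rfl | hc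
      · exact hs c (List.mem_cons_self ..)
      · exact hcur c hc

theorem mem_split₀_prop (P : Char → Prop) (cs : List Char) (h : ∀ c ∈ cs, P c) :
    ∀ w ∈ PySem.Chars.split₀ cs, ∀ c ∈ w, P c := by
  intro w hw
  exact split₀_go_prop P cs [] [] h (by simp) (by simp) w (by simpa [PySem.Chars.split₀] using hw)

theorem cleaned_textA_eq (s : String) :
    cleaned_textA s = String.ofList (cleanCharsB s.toList) := by
  unfold cleaned_textA cleanCharsB
  congr 1
  rw [PySem.List.foldl_congr_mem s.toList _
      (fun acc c => if (!pvPunct.contains c) = true then acc ++ [PySem.Chars.lowerChar c] else acc) []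
      (by intro acc c _; by_cases hc : pvPunct.contains c <;> simp [hc])]
  simpa using PySem.List.foldl_append_if (fun c => !pvPunct.contains c) PySem.Chars.lowerChar s.toList []

theorem cleaned_textA_fix (w : String)
    (h : ∀ c ∈ w.toList, CleanFixed c) : cleaned_textA w = w := by
  rw [cleaned_textA_eq]
  have : cleanCharsB w.toList = w.toList := by
    unfold cleanCharsB
    rw [List.filter_eq_self.mpr (fun c hc => by simpa using (h c hc).2)]
    exact List.map_congr_left (fun c hc => (h c hc).1) |>.trans (List.map_id _)
  rw [this]
  simp

theorem words_cleanFixed (L : List Char) (hL : ∀ c ∈ L, CleanFixed c) :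
    ∀ w ∈ PySem.Str.split₀ (String.ofList L), ∀ c ∈ w.toList, CleanFixed c := by
  intro w hw c hc
  have hmem : w.toList ∈ PySem.Chars.split₀ (String.ofList L).toList := by
    rw [← PySem.Str.split₀_map_toList]
    exact List.mem_map_of_mem hw
  have hLl : (String.ofList L).toList = L := by simp
  rw [hLl] at hmem
  exact mem_split₀_prop CleanFixed L hL w.toList hmem c hc

theorem str_to_wordsA_eq (L : List Char) (hL : ∀ c ∈ L, CleanFixed c) :
    str_to_wordsA (String.ofList L) = PySem.Str.split₀ (String.ofList L) := by
  unfold str_to_wordsA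
  rw [List.map_congr_left (fun w hw => cleaned_textA_fix w (words_cleanFixed L hL w hw))]
  exact List.map_id _

theorem str_to_unique_wordsA_eq (L : List Char) (hL : ∀ c ∈ L, CleanFixed c) :
    str_to_unique_wordsA (String.ofList L) =
      PySem.List.dedup (PySem.Str.split₀ (String.ofList L)) := by
  unfold str_to_unique_wordsA
  rw [PySem.List.foldl_congr_mem _ _ PySem.Set.add []
      (by
        intro acc w hw
        rw [cleaned_textA_fix w (words_cleanFixed L hL w hw)]
        rfl)]
  rw [PySem.List.dedup_eq_ofList]
  rfl

theorem transGoA_spec (ws : List String) (f s : String) :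
    ∀ (k : Nat) (c : Int), k ≤ ws.length →
      transGoA ws f s (PySem.List.pyRange (k : Int) (ws.length : Int) 1) c =
        c + (((ws.drop k).zip (ws.drop k).tail).count (f, s) : Int) := by
  intro k
  induction hn : ws.length - k using Nat.strong_induction_on generalizing k with
  | _ n ih =>
  intro c hk
  rcases Nat.eq_or_lt_of_le hk with heq | hlt
  · rw [PySem.List.pyRange_one_eq_nil (by omega), heq]
    simp [transGoA, List.drop_length]
  · rw [PySem.List.pyRange_one_cons (by exact_mod_cast hlt)]
    have hget : PySem.List.pyGet? ws (k : Int) = some ws[k] := by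
      rw [PySem.List.pyGet?_natCast, List.getElem?_eq_getElem hlt]
    have hdrop : ws.drop k = ws[k] :: ws.drop (k + 1) := List.drop_eq_getElem_cons hlt
    have hcast : ((k : Int) + 1) = ((k + 1 : Nat) : Int) := by push_cast; ring
    rw [transGoA, hget, hcast]
    dsimp only
    by_cases hk1 : k + 1 < ws.length
    · have hget1 : PySem.List.pyGet? ws ((k + 1 : Nat) : Int) = some ws[k+1] := by
        rw [PySem.List.pyGet?_natCast, List.getElem?_eq_getElem hk1]
      have hdrop1 : ws.drop (k + 1) = ws[k+1] :: ws.drop (k + 2) := List.drop_eq_getElem_cons hk1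
      have ihk := fun c => ih (ws.length - (k+1)) (by omega) (k+1) rfl c (by omega)
      by_cases hf : ws[k] = f
      · rw [if_pos hf, hget1]
        dsimp only
        rw [ihk, hdrop]
        simp only [List.tail_cons]
        rw [hdrop1]
        simp only [List.tail_cons, List.zip_cons_cons, List.count_cons]
        by_cases hs : ws[k+1] = s
        · have hbe : ((ws[k], ws[k+1]) == (f, s)) = true := by simp [hf, hs]
          rw [hbe, if_pos rfl, if_pos hs]
          push_cast; ring
        · have hbe : ((ws[k], ws[k+1]) == (f, s)) = false := by simp [Prod.ext_iff, hs]
          rw [hbe, if_neg hs]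
          simp
      · rw [if_neg hf, ihk, hdrop]
        simp only [List.tail_cons]
        rw [hdrop1]
        simp only [List.tail_cons, List.zip_cons_cons, List.count_cons]
        have hbe : ((ws[k], ws[k+1]) == (f, s)) = false := by simp [Prod.ext_iff, hf]
        rw [hbe]
        simp
    · -- k + 1 = ws.length: next index raises IndexError (if reached)
      have hlen : k + 1 = ws.length := by omega
      have hget1 : PySem.List.pyGet? ws ((k + 1 : Nat) : Int) = none := by
        rw [PySem.List.pyGet?_natCast, List.getElem?_eq_none (by omega)]
      have hzip : ((ws.drop k).zip (ws.drop k).tail) = [] := by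
        rw [hdrop, List.tail_cons, List.drop_eq_nil_of_le (by omega)]
        simp
      by_cases hf : ws[k] = f
      · rw [if_pos hf, hget1]
        dsimp only
        rw [hzip]
        simp
      · rw [if_neg hf]
        have := ih (ws.length - (k+1)) (by omega) (k+1) rfl c (by omega)
        rw [this, hzip]
        rw [List.drop_eq_nil_of_le (by omega)]
        simp

theorem transitionsA_spec (L : List Char) (hL : ∀ c ∈ L, CleanFixed c) (f s : String) :
    transitionsA (String.ofList L) f s =
      (((PySem.Str.split₀ (String.ofList L)).zip
        (PySem.Str.split₀ (String.ofList L)).tail).count (f, s) : Int) := by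
  unfold transitionsA
  rw [str_to_wordsA_eq L hL]
  set ws := PySem.Str.split₀ (String.ofList L) with hws
  by_cases h0 : ws.length = 0
  · rw [List.length_eq_zero_iff.mp h0]
    simp
  · rw [if_pos h0]
    have := transGoA_spec ws f s 0 0 (by omega)
    simpa using this

-- ===== VERDICT (by name: the statement is the Claim_ definition above) =====
theorem xmatrix_spec : Claim_equal_xmatrix := by
  intro s _
  unfold Spec_xmatrix xmatrix xmatrix_alt
  have hL : ∀ c ∈ cleanCharsB s.toList, CleanFixed c := fun c hc => mem_cleanCharsB_cleanFixed hc
  rw [cleaned_textA_eq]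
  set L := cleanCharsB s.toList with hLdef
  show (str_to_unique_wordsA (String.ofList L)).map _ = _
  rw [str_to_unique_wordsA_eq L hL]
  apply List.map_congr_left
  intro a _
  apply List.map_congr_left
  intro b _
  rw [transitionsA_spec L hL a b, PySem.Dict.getD_foldl_insert_add_one, PySem.Dict.getD_empty]
  simp
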